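-- pv_equiv track=rewrite | github.com/JT-aa/OA | 2.py | mark_brackets
-- ===== SOURCE A (Python) =====
-- def mark_brackets(string):
--
--     n = len(string)
--     right_pos = []
--     left_pos = []
--     ans = []
--     stack = []
--
--     for i in range(n):
--         if string[i] != '(' and string[i] != ')':
--             continue
--         elif string[i] == ')' and not stack:
--             right_pos.append(i)
--         elif string[i] == ')' and stack:
--             stack.pop()
--         elif string[i] == '(':
--             stack.append(i)
--
--     left_pos = stack
--
--     for i in range(n):
--         if i in left_pos:
--             ans.append('x')
--         elif i in right_pos:
--             ans.append('?')
--         else: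
--             ans.append(' ')
--
--     return "".join(ans)
-- ===== SOURCE B (Python) =====
-- def mark_brackets(string):
--     n = len(string)
--     ans = [' '] * n
--     depth = 0
--     for i, c in enumerate(string):
--         if c == '(':
--             depth += 1
--         elif c == ')':
--             if depth == 0:
--                 ans[i] = '?'
--             else:
--                 depth -= 1
--     need = 0
--     for i in range(n - 1, -1, -1):
--         c = string[i]
--         if c == ')':
--             need += 1
--         elif c == '(':
--             if need == 0:
--                 ans[i] = 'x'
--             else:
--                 need -= 1
--     return "".join(ans)
-- ===== Notes on version B (the rewrite author's own statement) =====
-- stated objective: alternative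
-- what changed: Replaces A's index stack and right/left position lists plus a full rescan with linear membership tests by two counter passes: a forward pass with an integer depth counter marking unmatched closers in place, and a backward pass with an integer counter marking unmatched openers, so no stack or position list is kept at all.
import Mathlib
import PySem

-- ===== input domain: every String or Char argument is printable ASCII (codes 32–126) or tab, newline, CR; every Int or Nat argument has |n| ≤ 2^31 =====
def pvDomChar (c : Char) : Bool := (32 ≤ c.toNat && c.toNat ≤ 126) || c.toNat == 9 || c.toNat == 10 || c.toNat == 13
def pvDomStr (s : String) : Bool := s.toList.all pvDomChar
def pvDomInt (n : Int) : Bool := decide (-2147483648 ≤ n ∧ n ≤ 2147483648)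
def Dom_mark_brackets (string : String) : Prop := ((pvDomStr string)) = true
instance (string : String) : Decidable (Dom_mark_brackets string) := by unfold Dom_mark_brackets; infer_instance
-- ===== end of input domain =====

-- B replaces A's index stack, position lists and membership-test rescan by two integer-counter
-- passes (forward for unmatched ')', backward for unmatched '(') writing marks in place.

-- ===== PORT A =====
-- first loop body of A: i ranges over range(n), string[i] read by index
-- (pyGetD with default ' ' is exact here: every index produced by range(n) is in range).
def markA_step (cs : List Char) (st : List Int × List Int) (i : Int) : List Int × List Int :=
  let c := PySem.List.pyGetD cs i ' '
  if c ≠ '(' ∧ c ≠ ')' then st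
  else if c = ')' ∧ st.2 = [] then (st.1 ++ [i], st.2)
  else if c = ')' ∧ st.2 ≠ [] then (st.1, st.2.dropLast)
  else if c = '(' then (st.1, st.2 ++ [i])
  else st

def mark_brackets (string : String) : String :=
  let cs := string.toList
  let n : Int := (cs.length : Int)
  let rs := (PySem.List.pyRange 0 n 1).foldl (markA_step cs) ([], [])
  let right_pos := rs.1
  let left_pos := rs.2
  let ans := (PySem.List.pyRange 0 n 1).foldl (fun acc i =>
      if left_pos.contains i then acc ++ ['x']
      else if right_pos.contains i then acc ++ ['?']
      else acc ++ [' ']) []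
  -- "".join of a list of single-character strings = String.ofList of the chars
  String.ofList ans

-- ===== PORT B =====
-- forward pass of B: folds over enumerate(string) with an integer depth counter;
-- ans[i] = '?' is List.set (i.toNat is exact: enumerate indices are nonnegative and in range).
def markBF_step (st : List Char × Int) (p : Int × Char) : List Char × Int :=
  if p.2 = '(' then (st.1, st.2 + 1)
  else if p.2 = ')' then
    if st.2 = 0 then (st.1.set p.1.toNat '?', st.2) else (st.1, st.2 - 1)
  else st

-- backward pass of B: i runs over range(n-1, -1, -1), c = string[i] read by index
def markBB_step (cs : List Char) (st : List Char × Int) (i : Int) : List Char × Int :=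
  let c := PySem.List.pyGetD cs i ' '
  if c = ')' then (st.1, st.2 + 1)
  else if c = '(' then
    if st.2 = 0 then (st.1.set i.toNat 'x', st.2) else (st.1, st.2 - 1)
  else st

def mark_brackets_alt (string : String) : String :=
  let cs := string.toList
  let n : Int := (cs.length : Int)
  let f := (PySem.List.enumerate cs).foldl markBF_step (List.replicate cs.length ' ', 0)
  let g := (PySem.List.pyRange (n - 1) (-1) (-1)).foldl (markBB_step cs) (f.1, 0)
  String.ofList g.1

-- ===== PRECONDITION & SPEC =====
def Spec_mark_brackets (string : String) (out : String) : Prop := out = mark_brackets_alt string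
instance (string : String) (out : String) : Decidable (Spec_mark_brackets string out) := by unfold Spec_mark_brackets; infer_instance

-- ===== CLAIM (what is proved, stated in full; the proofs are below) =====
def Claim_equal_mark_brackets : Prop := ∀ (string : String), Dom_mark_brackets string → Spec_mark_brackets string (mark_brackets string)

-- ===== LEMMAS AND PROOFS =====

-- A's first-loop body re-expressed on (index, char) pairs, as produced by enumerate.
def gA (st : List Int × List Int) (p : Int × Char) : List Int × List Int :=
  if p.2 ≠ '(' ∧ p.2 ≠ ')' then st
  else if p.2 = ')' ∧ st.2 = [] then (st.1 ++ [p.1], st.2)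
  else if p.2 = ')' ∧ st.2 ≠ [] then (st.1, st.2.dropLast)
  else if p.2 = '(' then (st.1, st.2 ++ [p.1])
  else st

lemma bridgeA (cs : List Char) (st : List Int × List Int) :
    (PySem.List.pyRange 0 ((cs.length : Int)) 1).foldl (markA_step cs) st
      = (PySem.List.enumerate cs).foldl gA st := by
  rw [PySem.List.enumerate_eq_map_pyRange cs ' ', List.foldl_map]
  rfl

-- unmatched closers of a pair list (what B's backward counter computes for a suffix)
def vcnt : List (Int × Char) → Nat
  | [] => 0
  | p :: l => if p.2 = '(' then vcnt l - 1 else if p.2 = ')' then vcnt l + 1 else vcnt l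

-- indices of closers that see depth 0, starting from depth d (A's right_pos; B's '?' writes)
def rfold : List (Int × Char) → Nat → List Int
  | [], _ => []
  | p :: l, d =>
    if p.2 = '(' then rfold l (d + 1)
    else if p.2 = ')' then (if d = 0 then p.1 :: rfold l 0 else rfold l (d - 1))
    else rfold l d

-- indices of openers never matched (A's leftover stack; B's 'x' writes)
def sfold : List (Int × Char) → List Int
  | [] => []
  | p :: l => if p.2 = '(' then (if vcnt l = 0 then p.1 :: sfold l else sfold l) else sfold l

-- characterization of A's first loop from an arbitrary stack
lemma mainA (l : List (Int × Char)) (r s : List Int) :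
    l.foldl gA (r, s)
      = (r ++ rfold l s.length, s.take (s.length - min s.length (vcnt l)) ++ sfold l) := by
  induction l generalizing r s with
  | nil => simp [rfold, vcnt, sfold]
  | cons p l ih =>
    simp only [List.foldl_cons]
    by_cases hL : p.2 = '('
    · have hg : gA (r, s) p = (r, s ++ [p.1]) := by
        unfold gA; rw [if_neg (by simp [hL]), if_neg (by simp [hL]), if_neg (by simp [hL]), if_pos hL]
      rw [hg, ih]
      have hr : rfold (p :: l) s.length = rfold l (s.length + 1) := by
        simp only [rfold]; rw [if_pos hL]
      have hlen : (s ++ [p.1]).length = s.length + 1 := by simp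
      rcases Nat.eq_zero_or_pos (vcnt l) with hv | hv
      · have hv' : vcnt (p :: l) = 0 := by simp only [vcnt]; rw [if_pos hL, hv]
        have hs' : sfold (p :: l) = p.1 :: sfold l := by simp only [sfold]; rw [if_pos hL, if_pos hv]
        rw [hr, hv, hv', hs']
        have ht : List.take (s.length + 1) (s ++ [p.1]) = s ++ [p.1] :=
          List.take_of_length_le (by simp)
        simp [ht]
      · have hv' : vcnt (p :: l) = vcnt l - 1 := by simp only [vcnt]; rw [if_pos hL]
        have hs' : sfold (p :: l) = sfold l := by
          simp only [sfold]; rw [if_pos hL, if_neg (by omega)]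
        rw [hr, hlen, hv', hs']
        have hm : s.length + 1 - min (s.length + 1) (vcnt l)
            = s.length - min s.length (vcnt l - 1) := by omega
        have hle : s.length + 1 - min (s.length + 1) (vcnt l) ≤ s.length := by omega
        rw [hm] at hle ⊢
        rw [List.take_append_of_le_length hle]
    · by_cases hR : p.2 = ')'
      · by_cases hs : s = []
        · subst hs
          have hg : gA (r, []) p = (r ++ [p.1], []) := by
            unfold gA; rw [if_neg (by simp [hR]), if_pos (by simp [hR])]
          rw [hg, ih]
          have hr : rfold (p :: l) 0 = p.1 :: rfold l 0 := by
            simp only [rfold]; rw [if_neg hL, if_pos hR]; simp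
          have hs' : sfold (p :: l) = sfold l := by simp only [sfold]; rw [if_neg hL]
          simp [hr, hs']
        · have hg : gA (r, s) p = (r, s.dropLast) := by
            unfold gA
            rw [if_neg (by simp [hR]), if_neg (by simp [hs]), if_pos (by exact ⟨hR, hs⟩)]
          rw [hg, ih]
          have hpos : 0 < s.length := List.length_pos_iff.mpr hs
          have hr : rfold (p :: l) s.length = rfold l (s.length - 1) := by
            simp only [rfold]; rw [if_neg hL, if_pos hR, if_neg (by omega)]
          have hv' : vcnt (p :: l) = vcnt l + 1 := by simp only [vcnt]; rw [if_neg hL, if_pos hR]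
          have hs' : sfold (p :: l) = sfold l := by simp only [sfold]; rw [if_neg hL]
          rw [hr, hv', hs', List.length_dropLast, List.dropLast_eq_take, List.take_take]
          have hm : min (s.length - 1 - min (s.length - 1) (vcnt l)) (s.length - 1)
              = s.length - min s.length (vcnt l + 1) := by omega
          rw [hm]
      · have hg : gA (r, s) p = (r, s) := by
          unfold gA; rw [if_pos ⟨hL, hR⟩]
        have hr : rfold (p :: l) s.length = rfold l s.length := by
          simp only [rfold]; rw [if_neg hL, if_neg hR]
        have hv' : vcnt (p :: l) = vcnt l := by simp only [vcnt]; rw [if_neg hL, if_neg hR]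
        have hs' : sfold (p :: l) = sfold l := by simp only [sfold]; rw [if_neg hL]
        rw [hg, ih, hr, hv', hs']

-- B's forward pass writes '?' at exactly rfold's indices
lemma mainBF (l : List (Int × Char)) (ans : List Char) (d : Nat) :
    (l.foldl markBF_step (ans, (d : Int))).1
      = (rfold l d).foldl (fun a i => a.set i.toNat '?') ans := by
  induction l generalizing ans d with
  | nil => simp [rfold]
  | cons p l ih =>
    simp only [List.foldl_cons]
    by_cases hL : p.2 = '('
    · have hb : markBF_step (ans, (d : Int)) p = (ans, ((d + 1 : Nat) : Int)) := by
        unfold markBF_step; rw [if_pos hL]; push_cast; ring_nf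
      have hr : rfold (p :: l) d = rfold l (d + 1) := by simp only [rfold]; rw [if_pos hL]
      rw [hb, hr, ih]
    · by_cases hR : p.2 = ')'
      · rcases Nat.eq_zero_or_pos d with hd | hd
        · subst hd
          have hb : markBF_step (ans, ((0 : Nat) : Int)) p
              = (ans.set p.1.toNat '?', ((0 : Nat) : Int)) := by
            unfold markBF_step; rw [if_neg hL, if_pos hR, if_pos (by norm_num)]
          have hr : rfold (p :: l) 0 = p.1 :: rfold l 0 := by
            simp only [rfold]; rw [if_neg hL, if_pos hR]; simp
          rw [hb, hr, List.foldl_cons]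
          exact ih (ans.set p.1.toNat '?') 0
        · have hb : markBF_step (ans, (d : Int)) p = (ans, ((d - 1 : Nat) : Int)) := by
            unfold markBF_step; rw [if_neg hL, if_pos hR, if_neg (by omega)]
            congr 1
            omega
          have hr : rfold (p :: l) d = rfold l (d - 1) := by
            simp only [rfold]; rw [if_neg hL, if_pos hR, if_neg (by omega)]
          rw [hb, hr, ih]
      · have hb : markBF_step (ans, (d : Int)) p = (ans, (d : Int)) := by
          unfold markBF_step; rw [if_neg hL, if_neg hR]
        have hr : rfold (p :: l) d = rfold l d := by simp only [rfold]; rw [if_neg hL, if_neg hR]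
        rw [hb, hr, ih]

-- B's backward step on (index, char) pairs
def hB (p : Int × Char) (st : List Char × Int) : List Char × Int :=
  if p.2 = ')' then (st.1, st.2 + 1)
  else if p.2 = '(' then
    if st.2 = 0 then (st.1.set p.1.toNat 'x', st.2) else (st.1, st.2 - 1)
  else st

-- B's backward pass writes 'x' at exactly sfold's indices and its counter computes vcnt
lemma mainBB (l : List (Int × Char)) (ans : List Char) :
    l.foldr hB (ans, 0)
      = ((sfold l).foldr (fun i a => a.set i.toNat 'x') ans, (vcnt l : Int)) := by
  induction l with
  | nil => simp [sfold, vcnt]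
  | cons p l ih =>
    rw [List.foldr_cons, ih]
    by_cases hR : p.2 = ')'
    · have hL : ¬ p.2 = '(' := by rw [hR]; decide
      have hs' : sfold (p :: l) = sfold l := by simp only [sfold]; rw [if_neg hL]
      have hv' : vcnt (p :: l) = vcnt l + 1 := by simp only [vcnt]; rw [if_neg hL, if_pos hR]
      unfold hB; rw [if_pos hR, hs', hv']
      push_cast; ring_nf
    · by_cases hL : p.2 = '('
      · rcases Nat.eq_zero_or_pos (vcnt l) with hv | hv
        · have hs' : sfold (p :: l) = p.1 :: sfold l := by
            simp only [sfold]; rw [if_pos hL, if_pos hv]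
          have hv' : vcnt (p :: l) = 0 := by simp only [vcnt]; rw [if_pos hL, hv]
          unfold hB
          rw [if_neg hR, if_pos hL, if_pos (by rw [hv]; norm_num), hs', hv', List.foldr_cons, hv]
        · have hs' : sfold (p :: l) = sfold l := by
            simp only [sfold]; rw [if_pos hL, if_neg (by omega)]
          have hv' : vcnt (p :: l) = vcnt l - 1 := by simp only [vcnt]; rw [if_pos hL]
          unfold hB
          rw [if_neg hR, if_pos hL, if_neg (by omega), hs', hv']
          congr 1
          omega
      · have hs' : sfold (p :: l) = sfold l := by simp only [sfold]; rw [if_neg hL]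
        have hv' : vcnt (p :: l) = vcnt l := by simp only [vcnt]; rw [if_neg hL, if_neg hR]
        unfold hB; rw [if_neg hR, if_neg hL, hs', hv']

-- every index produced by rfold / sfold comes from the pair list
lemma rfold_sub (l : List (Int × Char)) (d : Nat) (x : Int) (hx : x ∈ rfold l d) :
    ∃ p ∈ l, x = p.1 := by
  induction l generalizing d with
  | nil => simp [rfold] at hx
  | cons p l ih =>
    simp only [rfold] at hx
    split_ifs at hx with h1 h2 h3
    · obtain ⟨q, hq, he⟩ := ih _ hx; exact ⟨q, List.mem_cons_of_mem _ hq, he⟩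
    · rcases List.mem_cons.mp hx with h | h
      · exact ⟨p, List.mem_cons_self .., h⟩
      · obtain ⟨q, hq, he⟩ := ih _ h; exact ⟨q, List.mem_cons_of_mem _ hq, he⟩
    · obtain ⟨q, hq, he⟩ := ih _ hx; exact ⟨q, List.mem_cons_of_mem _ hq, he⟩
    · obtain ⟨q, hq, he⟩ := ih _ hx; exact ⟨q, List.mem_cons_of_mem _ hq, he⟩

lemma sfold_sub (l : List (Int × Char)) (x : Int) (hx : x ∈ sfold l) :
    ∃ p ∈ l, x = p.1 := by
  induction l with
  | nil => simp [sfold] at hx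
  | cons p l ih =>
    simp only [sfold] at hx
    split_ifs at hx
    · rcases List.mem_cons.mp hx with h | h
      · exact ⟨p, List.mem_cons_self .., h⟩
      · obtain ⟨q, hq, he⟩ := ih h; exact ⟨q, List.mem_cons_of_mem _ hq, he⟩
    · obtain ⟨q, hq, he⟩ := ih hx; exact ⟨q, List.mem_cons_of_mem _ hq, he⟩
    · obtain ⟨q, hq, he⟩ := ih hx; exact ⟨q, List.mem_cons_of_mem _ hq, he⟩

lemma foldl_set_length (I : List Int) (L : List Char) (ch : Char) :
    (I.foldl (fun a i => a.set i.toNat ch) L).length = L.length := by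
  induction I generalizing L with
  | nil => rfl
  | cons i I ih => simp [ih]

lemma foldr_set_length (I : List Int) (L : List Char) (ch : Char) :
    (I.foldr (fun i a => a.set i.toNat ch) L).length = L.length := by
  induction I with
  | nil => rfl
  | cons i I ih => simp [ih]

-- reading a cell after a batch of in-place writes at the indices of I (foldl order)
lemma foldl_set_getElem? (I : List Int) (L : List Char) (ch : Char) (j : Nat)
    (hI : ∀ i ∈ I, 0 ≤ i) (hj : j < L.length) :
    (I.foldl (fun a i => a.set i.toNat ch) L)[j]?
      = if I.contains (j : Int) then some ch else L[j]? := by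
  induction I generalizing L with
  | nil => simp
  | cons i I ih =>
    have hi : 0 ≤ i := hI i (List.mem_cons_self ..)
    have hI' : ∀ x ∈ I, 0 ≤ x := fun x hx => hI x (List.mem_cons_of_mem _ hx)
    simp only [List.foldl_cons]
    rw [ih (L.set i.toNat ch) hI' (by simpa using hj)]
    by_cases hmem : (j : Int) ∈ I
    · simp [hmem]
    · have hm' : I.contains (j : Int) = false := by simpa using hmem
      by_cases hij : i = (j : Int)
      · have ht : i.toNat = j := by omega
        simp [hmem, hij, hj]
      · have ht : i.toNat ≠ j := by omega
        have hji : ¬((j : Int) = i) := fun h => hij h.symm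
        simp [hmem, hji, ht]

-- the same for foldr order
lemma foldr_set_getElem? (I : List Int) (L : List Char) (ch : Char) (j : Nat)
    (hI : ∀ i ∈ I, 0 ≤ i) (hj : j < L.length) :
    (I.foldr (fun i a => a.set i.toNat ch) L)[j]?
      = if I.contains (j : Int) then some ch else L[j]? := by
  induction I with
  | nil => simp
  | cons i I ih =>
    have hi : 0 ≤ i := hI i (List.mem_cons_self ..)
    have hI' : ∀ x ∈ I, 0 ≤ x := fun x hx => hI x (List.mem_cons_of_mem _ hx)
    simp only [List.foldr_cons]
    by_cases hij : i = (j : Int)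
    · have ht : i.toNat = j := by omega
      have hjlt : j < (I.foldr (fun i a => a.set i.toNat ch) L).length := by
        rw [foldr_set_length]; exact hj
      simp [hjlt, hij]
    · have ht : i.toNat ≠ j := by omega
      have hji : ¬((j : Int) = i) := fun h => hij h.symm
      rw [List.getElem?_set_ne ht, ih hI']
      by_cases hmem : (j : Int) ∈ I
      · simp [hmem]
      · simp [hmem, hji]

-- ===== VERDICT (by name: the statement is the Claim_ definition above) =====
theorem mark_brackets_spec : Claim_equal_mark_brackets := by
  intro string _
  show mark_brackets string = mark_brackets_alt string
  simp only [mark_brackets, mark_brackets_alt]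
  rw [bridgeA string.toList ([], [])]
  set cs := string.toList with hcs
  set n := cs.length with hn
  set e := PySem.List.enumerate cs with he
  have hnnE : ∀ p ∈ e, 0 ≤ p.1 := by
    intro p hp
    rcases (PySem.List.mem_enumerate_iff cs 0 p).mp hp with ⟨k, hk, rfl⟩
    simp
  have hnnR : ∀ x ∈ rfold e 0, 0 ≤ x := by
    intro x hx; obtain ⟨p, hp, rfl⟩ := rfold_sub e 0 x hx; exact hnnE p hp
  have hnnS : ∀ x ∈ sfold e, 0 ≤ x := by
    intro x hx; obtain ⟨p, hp, rfl⟩ := sfold_sub e x hx; exact hnnE p hp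
  -- A side: first loop characterized
  rw [mainA e [] []]
  simp only [List.nil_append, List.length_nil, List.take_nil]
  -- B side: forward pass
  have hBF : ((e.foldl markBF_step (List.replicate n ' ', 0)).1)
      = (rfold e 0).foldl (fun a i => a.set i.toNat '?') (List.replicate n ' ') := by
    have := mainBF e (List.replicate n ' ') 0
    simpa using this
  -- B side: backward pass = foldr over enumerate
  have hrange : PySem.List.pyRange ((n : Int) - 1) (-1) (-1)
      = (PySem.List.pyRange 0 (n : Int) 1).reverse := by
    rw [PySem.List.pyRange_neg_one_eq_reverse]
    norm_num
  have hBB1 : ∀ st : List Char × Int,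
      (PySem.List.pyRange ((n : Int) - 1) (-1) (-1)).foldl (markBB_step cs) st
        = e.foldr hB st := by
    intro st
    rw [hrange, List.foldl_reverse, he, PySem.List.enumerate_eq_map_pyRange cs ' ',
        List.foldr_map]
    rfl
  have hBB2 := mainBB e ((rfold e 0).foldl (fun a i => a.set i.toNat '?') (List.replicate n ' '))
  -- both sides are String.ofList; compare the char lists cellwise
  congr 1
  rw [hBF, hBB1, hBB2]
  -- A's second loop as a map over the range
  have hA : (PySem.List.pyRange 0 (n : Int) 1).foldl (fun acc i =>
      if (sfold e).contains i then acc ++ ['x']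
      else if (rfold e 0).contains i then acc ++ ['?']
      else acc ++ [' ']) []
      = (PySem.List.pyRange 0 (n : Int) 1).map
          (fun i => if (sfold e).contains i then 'x'
                    else if (rfold e 0).contains i then '?' else ' ') := by
    have hm := PySem.List.foldl_append_singleton_eq_map
        (f := fun i => if (sfold e).contains i then 'x'
                       else if (rfold e 0).contains i then '?' else ' ')
        (l := PySem.List.pyRange 0 (n : Int) 1) (acc := [])
    rw [List.nil_append] at hm
    rw [← hm]
    apply PySem.List.foldl_congr_mem
    intro acc x _
    split_ifs <;> rfl
  refine Eq.trans hA ?_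
  rw [PySem.List.pyRange_zero_natCast, List.map_map]
  apply List.ext_getElem?
  intro j
  have hlenB : ((sfold e).foldr (fun i a => a.set i.toNat 'x')
      ((rfold e 0).foldl (fun a i => a.set i.toNat '?') (List.replicate n ' '))).length = n := by
    rw [foldr_set_length, foldl_set_length, List.length_replicate]
  by_cases hj : j < n
  · rw [List.getElem?_map, List.getElem?_range hj]
    rw [foldr_set_getElem? (sfold e) _ 'x' j hnnS
          (by rw [foldl_set_length, List.length_replicate]; exact hj),
        foldl_set_getElem? (rfold e 0) _ '?' j hnnR (by rw [List.length_replicate]; exact hj)]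
    by_cases h2 : (j : Int) ∈ sfold e
    · simp [h2]
    · by_cases h1 : (j : Int) ∈ rfold e 0
      · simp [h1, h2]
      · simp [h1, h2, hj]
  · rw [List.getElem?_eq_none (by simpa using Nat.le_of_not_lt hj)]
    symm
    apply List.getElem?_eq_none
    rw [hlenB]; exact Nat.le_of_not_lt hj
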